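-- pv_equiv track=rewrite | github.com/kcaran/adventofcode2025 | day06.py | op_b
-- ===== SOURCE A (Python) =====
-- def op_b(op, nums ):
--    calc = 1 if (op == '*') else 0
--    for n in nums:
--        if (op == '+'):
--            calc += int(n)
--        elif (op == '*'):
--            calc *= int(n)
--    return calc
-- ===== SOURCE B (Python) =====
-- def op_b(op, nums):
--     # Divide-and-conquer balanced reduction over the index range (valid since + and * are associative).
--     def reduce(f, e, lo, hi):
--         if hi == lo:
--             return e
--         if hi - lo == 1:
--             return int(nums[lo])
--         mid = (lo + hi) // 2
--         return f(reduce(f, e, lo, mid), reduce(f, e, mid, hi))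
--     if op == '+':
--         return reduce(lambda a, b: a + b, 0, 0, len(nums))
--     if op == '*':
--         return reduce(lambda a, b: a * b, 1, 0, len(nums))
--     return 0
-- ===== Notes on version B (the rewrite author's own statement) =====
-- stated objective: alternative
-- what changed: Replaces A's single left-to-right fold (re-testing op on every element with a branch-dependent seed) by a recursive divide-and-conquer reduction that splits the index range in half and combines the two halves with the dispatched operator, correct because + and * are associative.
import Mathlib
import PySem

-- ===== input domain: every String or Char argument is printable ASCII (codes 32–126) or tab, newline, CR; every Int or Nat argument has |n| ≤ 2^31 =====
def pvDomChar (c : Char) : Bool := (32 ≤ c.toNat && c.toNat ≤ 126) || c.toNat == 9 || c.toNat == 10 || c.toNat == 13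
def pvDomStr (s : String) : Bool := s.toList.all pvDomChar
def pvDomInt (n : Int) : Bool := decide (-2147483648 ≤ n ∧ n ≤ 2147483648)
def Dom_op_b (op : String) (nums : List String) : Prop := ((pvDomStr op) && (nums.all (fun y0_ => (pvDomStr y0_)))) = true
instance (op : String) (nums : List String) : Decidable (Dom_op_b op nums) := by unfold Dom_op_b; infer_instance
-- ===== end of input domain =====

-- B replaces A's left fold by a recursive divide-and-conquer reduction (split in half, combine with the dispatched associative operator); same cost, different structure.


-- ===== PORT A =====
def op_b (op : String) (nums : List String) : Int :=
  nums.foldl (fun c n =>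
    if op == "+" then c + (PySem.Int.ofStr? n).getD 0
    else if op == "*" then c * (PySem.Int.ofStr? n).getD 0
    else c) (if op == "*" then 1 else 0)

-- ===== PORT B =====
-- Source B's inner `reduce(f, e, lo, hi)` on the segment nums[lo:hi], rendered on the sublist.
def pvReduce (f : Int → Int → Int) (e : Int) (xs : List String) : Int :=
  if _h0 : xs.length = 0 then e
  else if _h1 : xs.length = 1 then (PySem.Int.ofStr? xs.headI).getD 0
  else f (pvReduce f e (xs.take (xs.length / 2))) (pvReduce f e (xs.drop (xs.length / 2)))
termination_by xs.length
decreasing_by all_goals simp; omega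

def op_b_alt (op : String) (nums : List String) : Int :=
  if op == "+" then pvReduce (· + ·) 0 nums
  else if op == "*" then pvReduce (· * ·) 1 nums
  else 0

-- ===== PRECONDITION & SPEC =====
-- Pre_ excludes exactly the inputs where Python A raises ValueError: op '+' or '*' with some element not an int literal.
def Pre_op_b (op : String) (nums : List String) : Prop :=
  (op = "+" ∨ op = "*") → ∀ n ∈ nums, (PySem.Int.ofStr? n).isSome
instance (op : String) (nums : List String) : Decidable (Pre_op_b op nums) := by unfold Pre_op_b; infer_instance
def pvWitness_op_b : String × List String := ("+", ["1", " 2 "])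
def Spec_op_b (op : String) (nums : List String) (out : Int) : Prop := out = op_b_alt op nums
instance (op : String) (nums : List String) (out : Int) : Decidable (Spec_op_b op nums out) := by unfold Spec_op_b; infer_instance

-- ===== CLAIM (what is proved, stated in full; the proofs are below) =====
def Claim_equal_op_b : Prop := ∀ (op : String) (nums : List String), Dom_op_b op nums → Pre_op_b op nums → Spec_op_b op nums (op_b op nums)

-- ===== LEMMAS AND PROOFS =====
def pvG (n : String) : Int := (PySem.Int.ofStr? n).getD 0

theorem pv_shift_add (xs : List String) : ∀ (a : Int),
    xs.foldl (fun c n => c + pvG n) a = a + xs.foldl (fun c n => c + pvG n) 0 := by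
  induction xs with
  | nil => intro a; simp
  | cons x xs ih => intro a; simp only [List.foldl]; rw [ih, ih (0 + pvG x)]; ring

theorem pv_shift_mul (xs : List String) : ∀ (a : Int),
    xs.foldl (fun c n => c * pvG n) a = a * xs.foldl (fun c n => c * pvG n) 1 := by
  induction xs with
  | nil => intro a; simp
  | cons x xs ih => intro a; simp only [List.foldl]; rw [ih, ih (1 * pvG x)]; ring

theorem pvReduce_add : ∀ (k : Nat) (xs : List String), xs.length ≤ k →
    pvReduce (· + ·) 0 xs = xs.foldl (fun c n => c + pvG n) 0 := by
  intro k
  induction k with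
  | zero =>
    intro xs h
    have : xs = [] := List.eq_nil_of_length_eq_zero (Nat.le_zero.mp h)
    subst this; simp [pvReduce]
  | succ k ih =>
    intro xs h
    rw [pvReduce]
    split
    · next h0 =>
      have : xs = [] := List.eq_nil_of_length_eq_zero h0
      subst this; simp
    · split
      · next h1 =>
        match xs, h1 with
        | [x], _ => simp [List.headI, pvG]
      · next h0 h1 =>
        have hlen : 2 ≤ xs.length := by omega
        have ht : (xs.take (xs.length / 2)).length ≤ k := by simp; omega
        have hd : (xs.drop (xs.length / 2)).length ≤ k := by simp; omega
        rw [ih _ ht, ih _ hd]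
        conv_rhs => rw [← List.take_append_drop (xs.length / 2) xs]
        rw [List.foldl_append]
        conv_rhs => rw [pv_shift_add]

theorem pvReduce_mul : ∀ (k : Nat) (xs : List String), xs.length ≤ k →
    pvReduce (· * ·) 1 xs = xs.foldl (fun c n => c * pvG n) 1 := by
  intro k
  induction k with
  | zero =>
    intro xs h
    have : xs = [] := List.eq_nil_of_length_eq_zero (Nat.le_zero.mp h)
    subst this; simp [pvReduce]
  | succ k ih =>
    intro xs h
    rw [pvReduce]
    split
    · next h0 =>
      have : xs = [] := List.eq_nil_of_length_eq_zero h0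
      subst this; simp
    · split
      · next h1 =>
        match xs, h1 with
        | [x], _ => simp [List.headI, pvG]
      · next h0 h1 =>
        have hlen : 2 ≤ xs.length := by omega
        have ht : (xs.take (xs.length / 2)).length ≤ k := by simp; omega
        have hd : (xs.drop (xs.length / 2)).length ≤ k := by simp; omega
        rw [ih _ ht, ih _ hd]
        conv_rhs => rw [← List.take_append_drop (xs.length / 2) xs]
        rw [List.foldl_append]
        conv_rhs => rw [pv_shift_mul]

-- ===== VERDICT (by name: the statement is the Claim_ definition above) =====
theorem op_b_spec : Claim_equal_op_b := by
  intro op nums _ _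
  unfold Spec_op_b op_b op_b_alt
  by_cases h1 : op = "+"
  · have h := pvReduce_add nums.length nums (le_refl _)
    simp only [pvG] at h
    simp [h1, h]
  · by_cases h2 : op = "*"
    · have h := pvReduce_mul nums.length nums (le_refl _)
      simp only [pvG] at h
      simp [h2, h]
    · simp [h1, h2]
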